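-- pv_equiv track=rewrite | github.com/anajuradocrespo/paradigmas_programacion_python | 5_Ejercicios_Clase_PDF_2.py | par_impar_tupla
-- ===== SOURCE A (Python) =====
-- def par_impar_tupla(conjunto):
--
--     impares = set()
--     pares = set()
--
--     for i in conjunto:
--         if i % 2 != 0:
--             impares.add(i)
--         else:
--             pares.add(i)
--
--     return pares, impares
-- ===== SOURCE B (Python) =====
-- def par_impar_tupla(conjunto):
--     pares = {i for i in conjunto if i % 2 == 0}
--     impares = set(conjunto) - pares
--     return pares, impares
-- ===== Notes on version B (the rewrite author's own statement) =====
-- stated objective: simpler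
-- what changed: Replaces the per-element branching loop that maintains two sets with a single set comprehension for the evens plus a set difference to recover the odds without re-testing parity.
import Mathlib
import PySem

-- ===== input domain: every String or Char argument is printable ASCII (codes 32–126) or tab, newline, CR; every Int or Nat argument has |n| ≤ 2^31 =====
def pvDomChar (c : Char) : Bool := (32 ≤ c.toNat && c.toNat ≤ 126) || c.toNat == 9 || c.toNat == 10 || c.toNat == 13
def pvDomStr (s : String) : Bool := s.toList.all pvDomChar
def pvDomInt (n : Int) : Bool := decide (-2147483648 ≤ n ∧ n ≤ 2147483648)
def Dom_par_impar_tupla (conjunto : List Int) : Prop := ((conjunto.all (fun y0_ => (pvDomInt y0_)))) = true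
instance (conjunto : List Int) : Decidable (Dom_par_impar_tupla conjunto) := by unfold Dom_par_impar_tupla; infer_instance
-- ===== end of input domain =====

-- B replaces the two-accumulator branching loop by a set comprehension for the evens
-- plus a set difference for the odds (objective: simpler).

-- ===== PORT A =====
def par_impar_tupla (conjunto : List Int) : List Int × List Int :=
  -- impares = set(); pares = set(); for i in conjunto: branch on i % 2 != 0; return pares, impares
  let st := conjunto.foldl
    (fun (st : PySem.Set Int × PySem.Set Int) i =>
      if PySem.Int.mod i 2 ≠ 0 then (PySem.Set.add st.1 i, st.2)
      else (st.1, PySem.Set.add st.2 i))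
    ((PySem.Set.empty : PySem.Set Int), (PySem.Set.empty : PySem.Set Int))
  (st.2, st.1)

-- ===== PORT B =====
def par_impar_tupla_alt (conjunto : List Int) : List Int × List Int :=
  -- pares = {i for i in conjunto if i % 2 == 0}; impares = set(conjunto) - pares
  let pares := PySem.Set.ofList (conjunto.filter (fun i => PySem.Int.mod i 2 == 0))
  let impares := PySem.Set.diff (PySem.Set.ofList conjunto) pares
  (pares, impares)

-- ===== PRECONDITION & SPEC =====
def Spec_par_impar_tupla (conjunto : List Int) (out : List Int × List Int) : Prop := out = par_impar_tupla_alt conjunto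
instance (conjunto : List Int) (out : List Int × List Int) : Decidable (Spec_par_impar_tupla conjunto out) := by unfold Spec_par_impar_tupla; infer_instance

-- ===== CLAIM (what is proved, stated in full; the proofs are below) =====
def Claim_equal_par_impar_tupla : Prop := ∀ (conjunto : List Int), Dom_par_impar_tupla conjunto → Spec_par_impar_tupla conjunto (par_impar_tupla conjunto)

-- ===== LEMMAS AND PROOFS =====

-- A's fold over a pair of sets is a pair of folds of Set.add over the two filtered lists.
theorem pv_fold_split (l : List Int) (a b : PySem.Set Int) :
    l.foldl
      (fun (st : PySem.Set Int × PySem.Set Int) i =>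
        if PySem.Int.mod i 2 ≠ 0 then (PySem.Set.add st.1 i, st.2)
        else (st.1, PySem.Set.add st.2 i)) (a, b)
    = ((l.filter (fun i => !(PySem.Int.mod i 2 == 0))).foldl PySem.Set.add a,
       (l.filter (fun i => PySem.Int.mod i 2 == 0)).foldl PySem.Set.add b) := by
  induction l generalizing a b with
  | nil => rfl
  | cons x xs ih =>
      simp only [List.foldl_cons, List.filter_cons]
      have hm : PySem.Int.mod x 2 = x % 2 := by
        simp [PySem.Int.mod, Int.fmod_eq_emod]
      by_cases h : x % 2 = 0
      · rw [if_neg (fun hn => hn (hm.trans h)), if_neg (by simp [h]),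
            if_pos (by simp [h]), List.foldl_cons]
        exact ih _ _
      · rw [if_pos (fun he => h (hm.symm.trans he)), if_pos (by simp [h]),
            if_neg (by simp [h]), List.foldl_cons]
        exact ih _ _
-- Set.add commutes with List.filter.
theorem pv_filter_add (p : Int → Bool) (s : PySem.Set Int) (x : Int) :
    (PySem.Set.add s x).filter p
      = if p x then PySem.Set.add (s.filter p) x else s.filter p := by
  simp only [PySem.Set.add, PySem.Set.contains]
  by_cases hc : List.contains s x = true
  · by_cases hp : p x = true <;>
      simp_all [List.mem_filter]
  · by_cases hp : p x = true <;>
      simp_all [List.mem_filter, List.filter_append]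

-- Folding Set.add commutes with List.filter, hence ofList commutes with filter.
theorem pv_filter_foldl (p : Int → Bool) (l : List Int) (a : PySem.Set Int) :
    (l.foldl PySem.Set.add a).filter p = (l.filter p).foldl PySem.Set.add (a.filter p) := by
  induction l generalizing a with
  | nil => rfl
  | cons x xs ih =>
      simp only [List.foldl_cons, List.filter_cons]
      by_cases hp : p x = true <;>
        simp [hp, ih, pv_filter_add]

-- ===== VERDICT (by name: the statement is the Claim_ definition above) =====
theorem par_impar_tupla_spec : Claim_equal_par_impar_tupla := by
  intro conjunto _
  show par_impar_tupla conjunto = par_impar_tupla_alt conjunto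
  unfold par_impar_tupla par_impar_tupla_alt
  rw [pv_fold_split]
  refine Prod.ext rfl ?_
  show PySem.Set.ofList (conjunto.filter (fun i => !(PySem.Int.mod i 2 == 0)))
      = PySem.Set.diff (PySem.Set.ofList conjunto)
          (PySem.Set.ofList (conjunto.filter (fun i => PySem.Int.mod i 2 == 0)))
  have h1 : PySem.Set.ofList (conjunto.filter (fun i => !(PySem.Int.mod i 2 == 0)))
      = (PySem.Set.ofList conjunto).filter (fun i => !(PySem.Int.mod i 2 == 0)) := by
    have := pv_filter_foldl (fun i => !(PySem.Int.mod i 2 == 0)) conjunto PySem.Set.empty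
    simpa [PySem.Set.ofList, PySem.Set.empty] using this.symm
  rw [h1]
  simp only [PySem.Set.diff]
  apply List.filter_congr
  intro x hx
  have hxl : x ∈ conjunto := (PySem.Set.mem_ofList conjunto x).mp hx
  have hm : PySem.Int.mod x 2 = x % 2 := by
    simp [PySem.Int.mod, Int.fmod_eq_emod]
  by_cases he : x % 2 = 0
  · have hct : (PySem.Set.ofList (conjunto.filter (fun i => PySem.Int.mod i 2 == 0))).contains x = true :=
      (PySem.Set.contains_iff _ _).mpr
        ((PySem.Set.mem_ofList _ _).mpr (List.mem_filter.mpr ⟨hxl, by simp [he]⟩))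
    rw [hct, hm, he]
    decide
  · have hcf : (PySem.Set.ofList (conjunto.filter (fun i => PySem.Int.mod i 2 == 0))).contains x = false := by
      rw [Bool.eq_false_iff, Ne, PySem.Set.contains_iff, PySem.Set.mem_ofList, List.mem_filter]
      rintro ⟨-, hb⟩
      rw [hm] at hb
      exact he (by simpa using hb)
    rw [hcf, hm]
    simp [he]
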